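-- pv_equiv track=rewrite | github.com/andreiclu/Python_basics | medium_hard_problems/weird_string.py | weird_str
-- ===== SOURCE A (Python) =====
-- def weird_str(string: str):
--     i = 0
--     new_str = ''
--
--     for char in string:
--         if char != ' ':
--             if i % 2 == 0:
--                 new_str += str.upper(char)
--             else:
--                 new_str += char
--             i +=1
--         else:
--             i = 0
--             new_str += char
--     return new_str
-- ===== SOURCE B (Python) =====
-- def weird_str(string: str):
--     return ' '.join(
--         ''.join(c.upper() if i % 2 == 0 else c for i, c in enumerate(word))
--         for word in string.split(' ')
--     )
-- ===== Notes on version B (the rewrite author's own statement) =====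
-- stated objective: idiomatic
-- what changed: Replaced A's single pass with a manually threaded position counter that resets on spaces by splitting on single spaces into words, a per-word enumerate-indexed comprehension, and rejoining with single spaces.
import Mathlib
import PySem

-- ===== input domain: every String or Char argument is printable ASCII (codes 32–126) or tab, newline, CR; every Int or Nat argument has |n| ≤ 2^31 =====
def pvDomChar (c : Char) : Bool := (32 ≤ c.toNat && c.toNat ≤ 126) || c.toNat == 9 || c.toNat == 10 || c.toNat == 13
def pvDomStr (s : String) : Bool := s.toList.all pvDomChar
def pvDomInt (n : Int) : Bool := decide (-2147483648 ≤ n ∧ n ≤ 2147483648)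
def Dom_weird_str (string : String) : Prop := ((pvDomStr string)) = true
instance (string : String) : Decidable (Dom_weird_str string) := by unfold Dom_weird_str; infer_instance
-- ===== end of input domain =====

-- B replaces A's manually threaded position counter (reset on each space) with
-- split(' ') / per-word enumerate / ' '.join — a different decomposition, same cost.

-- ===== PORT A =====
-- loop state: (i, new_str); one pass over the characters, counter resets on ' '
def weird_str (string : String) : String :=
  String.ofList
    (string.toList.foldl
      (fun (st : Int × List Char) c =>
        if c ≠ ' ' then
          (st.1 + 1,
           st.2 ++ [if PySem.Int.mod st.1 2 = 0 then PySem.Chars.upperChar c else c])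
        else (0, st.2 ++ [c]))
      (0, [])).2

-- ===== PORT B =====
def weird_str_alt (string : String) : String :=
  String.ofList (PySem.Chars.join [' ']
    ((PySem.Chars.splitOn string.toList [' ']).map
      (fun w => (PySem.List.enumerate w 0).map
        (fun p => if PySem.Int.mod p.1 2 = 0 then PySem.Chars.upperChar p.2 else p.2))))

-- ===== PRECONDITION & SPEC =====
def Spec_weird_str (string : String) (out : String) : Prop := out = weird_str_alt string
instance (string : String) (out : String) : Decidable (Spec_weird_str string out) := by unfold Spec_weird_str; infer_instance

-- ===== CLAIM (what is proved, stated in full; the proofs are below) =====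
def Claim_equal_weird_str : Prop := ∀ (string : String), Dom_weird_str string → Spec_weird_str string (weird_str string)

-- ===== LEMMAS AND PROOFS =====

-- per-word transform (B's inner generator), starting the index at i
def pvMapIdx (i : Int) (w : List Char) : List Char :=
  (PySem.List.enumerate w i).map
    (fun p => if PySem.Int.mod p.1 2 = 0 then PySem.Chars.upperChar p.2 else p.2)

-- A's loop, as a structural recursion producing only the output characters
def pvCore (i : Int) : List Char → List Char
  | [] => []
  | c :: cs =>
      if c = ' ' then ' ' :: pvCore 0 cs
      else (if PySem.Int.mod i 2 = 0 then PySem.Chars.upperChar c else c) :: pvCore (i + 1) cs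

-- simple structural form of splitting on a single space
def pvSplit : List Char → List (List Char)
  | [] => [[]]
  | c :: cs =>
      if c = ' ' then [] :: pvSplit cs
      else (c :: (pvSplit cs).headI) :: (pvSplit cs).tail

-- joining the transformed words, first word transformed from index i
def pvG (i : Int) : List (List Char) → List Char
  | [] => []
  | [w] => pvMapIdx i w
  | w :: w' :: ws => pvMapIdx i w ++ ' ' :: pvG 0 (w' :: ws)

lemma pvSplit_ne_nil (cs : List Char) : pvSplit cs ≠ [] := by
  cases cs with
  | nil => simp [pvSplit]
  | cons c cs => simp only [pvSplit]; split <;> simp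

lemma pvGo_eq (fuel : Nat) (l cur : List Char) (acc : List (List Char))
    (h : l.length ≤ fuel) :
    PySem.Chars.splitOn.go [' '] fuel l cur acc =
      acc.reverse ++ ((cur.reverse ++ (pvSplit l).headI) :: (pvSplit l).tail) := by
  induction fuel generalizing l cur acc with
  | zero =>
      have : l = [] := List.eq_nil_of_length_eq_zero (Nat.le_zero.mp h)
      subst this
      simp [PySem.Chars.splitOn.go, pvSplit]
  | succ fuel ih =>
      cases l with
      | nil => simp [PySem.Chars.splitOn.go, pvSplit]
      | cons c rest =>
          simp only [PySem.Chars.splitOn.go]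
          by_cases hc : c = ' '
          · subst hc
            have hpre : [' '].isPrefixOf (' ' :: rest) = true := by
              simp [List.isPrefixOf]
            rw [if_pos hpre]
            have hrec := ih rest [] (cur.reverse :: acc)
              (by simpa using Nat.le_of_succ_le_succ h)
            have hne := pvSplit_ne_nil rest
            cases hs : pvSplit rest with
            | nil => exact absurd hs hne
            | cons h' t' =>
                rw [show (List.drop [' '].length (' ' :: rest)) = rest from rfl, hrec]
                simp [pvSplit, hs]
          · have hpre : [' '].isPrefixOf (c :: rest) = false := by
              simp [List.isPrefixOf]; exact fun h' => hc h'.symm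
            rw [if_neg (by simp [hpre])]
            have := ih rest (c :: cur) acc (by simpa using Nat.le_of_succ_le_succ h)
            rw [this]
            have hne := pvSplit_ne_nil rest
            cases hs : pvSplit rest with
            | nil => exact absurd hs hne
            | cons h' t' => simp [pvSplit, hc, hs]

lemma pvSplitOn_eq (cs : List Char) :
    PySem.Chars.splitOn cs [' '] = pvSplit cs := by
  rw [PySem.Chars.splitOn, pvGo_eq _ _ _ _ (Nat.le_succ _)]
  have hne := pvSplit_ne_nil cs
  cases hs : pvSplit cs with
  | nil => exact absurd hs hne
  | cons h t => simp

lemma pvMapIdx_nil (i : Int) : pvMapIdx i [] = [] := by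
  simp [pvMapIdx, PySem.List.enumerate_nil]

lemma pvMapIdx_cons (i : Int) (c : Char) (w : List Char) :
    pvMapIdx i (c :: w) =
      (if PySem.Int.mod i 2 = 0 then PySem.Chars.upperChar c else c) :: pvMapIdx (i + 1) w := by
  simp [pvMapIdx, PySem.List.enumerate_cons]

lemma pvCore_eq_g (cs : List Char) (i : Int) :
    pvCore i cs = pvG i (pvSplit cs) := by
  induction cs generalizing i with
  | nil => simp [pvCore, pvSplit, pvG, pvMapIdx_nil]
  | cons c cs ih =>
      by_cases hc : c = ' '
      · subst hc
        have hne := pvSplit_ne_nil cs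
        cases hs : pvSplit cs with
        | nil => exact absurd hs hne
        | cons h t =>
            simp only [pvCore, pvSplit, if_pos rfl, ih]
            simp [hs, pvG, pvMapIdx_nil]
      · have hne := pvSplit_ne_nil cs
        cases hs : pvSplit cs with
        | nil => exact absurd hs hne
        | cons h t =>
            simp only [pvCore, pvSplit, if_neg hc, hs, ih]
            cases t with
            | nil => simp [pvG, pvMapIdx_cons]
            | cons w' ws => simp [pvG, pvMapIdx_cons]

lemma pvJoin_eq_g (ws : List (List Char)) (h : ws ≠ []) :
    PySem.Chars.join [' '] (ws.map (pvMapIdx 0)) = pvG 0 ws := by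
  induction ws with
  | nil => exact absurd rfl h
  | cons w t ih =>
      cases t with
      | nil => simp [pvG, PySem.Chars.join_singleton]
      | cons w' ws' =>
          simp only [List.map_cons] at ih ⊢
          rw [PySem.Chars.join_cons_cons, ih (by simp)]
          simp [pvG]

lemma pvFoldA (cs : List Char) (i : Int) (acc : List Char) :
    (cs.foldl
      (fun (st : Int × List Char) c =>
        if c ≠ ' ' then
          (st.1 + 1,
           st.2 ++ [if PySem.Int.mod st.1 2 = 0 then PySem.Chars.upperChar c else c])
        else (0, st.2 ++ [c]))
      (i, acc)).2 = acc ++ pvCore i cs := by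
  induction cs generalizing i acc with
  | nil => simp [pvCore]
  | cons c cs ih =>
      simp only [List.foldl_cons]
      by_cases hc : c = ' '
      · rw [if_neg (by simp [hc]), ih]; simp [pvCore, hc]
      · rw [if_pos (by simp [hc]), ih]; simp [pvCore, hc]

-- ===== VERDICT (by name: the statement is the Claim_ definition above) =====
theorem weird_str_spec : Claim_equal_weird_str := by
  intro string _
  show weird_str string = weird_str_alt string
  unfold weird_str weird_str_alt
  rw [pvFoldA, pvSplitOn_eq]
  have : ((pvSplit string.toList).map (fun w => (PySem.List.enumerate w 0).map
      (fun p => if PySem.Int.mod p.1 2 = 0 then PySem.Chars.upperChar p.2 else p.2)))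
      = (pvSplit string.toList).map (pvMapIdx 0) := rfl
  rw [this, pvJoin_eq_g _ (pvSplit_ne_nil _), ← pvCore_eq_g]
  simp
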